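-- pv_equiv track=rewrite | github.com/shlyapos/bmstu_python_prog | 1_semester/Strokovaya_matrica.py | massiv
-- ===== SOURCE A (Python) =====
-- def massiv(i,matrix,stroka,dlc_word=''):
--     for j in range(len(matrix[i])):
--         if ('а'<= matrix[i][j] <='я'  or 'a'<= matrix[i][j] <='z' or
--             'А'<= matrix[i][j] <='Я' or 'A'<= matrix[i][j] <='Z'):
--             dlc_word+=matrix[i][j]
--         else:
--             stroka.append(dlc_word)
--             stroka.append(matrix[i][j])
--             dlc_word=''
--
--     return stroka
-- ===== SOURCE B (Python) =====
-- def massiv(i, matrix, stroka, dlc_word=''):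
--     # Right-to-left scan: collect tokens in reverse order, then extend stroka once.
--     out_rev = []
--     word = ''
--     seen = False
--     for x in reversed(matrix[i]):
--         if ('а' <= x <= 'я' or 'a' <= x <= 'z' or
--                 'А' <= x <= 'Я' or 'A' <= x <= 'Z'):
--             word = x + word
--         else:
--             if seen:
--                 out_rev.append(word)
--             out_rev.append(x)
--             word = ''
--             seen = True
--     if seen:
--         out_rev.append(dlc_word + word)
--     stroka.extend(reversed(out_rev))
--     return stroka
-- ===== Notes on version B (the rewrite author's own statement) =====
-- stated objective: alternative
-- what changed: Replaces A's forward scan that appends each (word, separator) pair as it goes with a right-to-left scan that collects the token list in reverse order (trailing letters drop out naturally, the seed word is attached once at the end) and extends stroka in a single step.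
import Mathlib
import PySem

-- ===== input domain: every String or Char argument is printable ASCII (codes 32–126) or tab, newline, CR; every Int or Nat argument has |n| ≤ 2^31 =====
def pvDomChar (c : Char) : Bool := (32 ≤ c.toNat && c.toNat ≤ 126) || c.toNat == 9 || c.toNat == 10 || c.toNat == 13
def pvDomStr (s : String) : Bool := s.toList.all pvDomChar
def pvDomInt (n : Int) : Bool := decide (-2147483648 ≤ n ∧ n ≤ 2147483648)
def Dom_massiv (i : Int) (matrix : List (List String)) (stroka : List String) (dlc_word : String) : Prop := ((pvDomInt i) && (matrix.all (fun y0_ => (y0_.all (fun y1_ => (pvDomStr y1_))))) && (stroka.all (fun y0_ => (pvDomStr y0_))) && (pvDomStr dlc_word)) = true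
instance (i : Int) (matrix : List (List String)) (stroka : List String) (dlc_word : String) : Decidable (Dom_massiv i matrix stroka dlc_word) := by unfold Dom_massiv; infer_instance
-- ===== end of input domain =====

-- B replaces A's forward accumulate-and-append loop with a right-to-left scan that
-- collects the tokens in reverse order and extends `stroka` once at the end (objective:
-- alternative). Both Pythons mutate `stroka` in place to the same final contents; the
-- equivalence proved here is about the return value.

-- ===== PORT A =====

-- Python's lexicographic `<=` on strings, as code-point comparison on the char lists.
def pyStrLe : List Char → List Char → Bool
  | [], _ => true
  | _ :: _, [] => false
  | a :: as, b :: bs => if a < b then true else if b < a then false else pyStrLe as bs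

-- A's letter test: the four chained string comparisons, in A's order.
def isLetterA (x : String) : Bool :=
  (pyStrLe "а".toList x.toList && pyStrLe x.toList "я".toList) ||
  (pyStrLe "a".toList x.toList && pyStrLe x.toList "z".toList) ||
  (pyStrLe "А".toList x.toList && pyStrLe x.toList "Я".toList) ||
  (pyStrLe "A".toList x.toList && pyStrLe x.toList "Z".toList)

def massiv (i : Int) (matrix : List (List String)) (stroka : List String) (dlc_word : String) : List String :=
  match PySem.List.pyGet? matrix i with
  | none => []  -- unreachable under Pre_massiv (Python raises IndexError)
  | some row =>
    (row.foldl (fun (st : List String × String) x =>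
      if isLetterA x then (st.1, st.2 ++ x)
      else (st.1 ++ [st.2, x], "")) (stroka, dlc_word)).1

-- ===== PORT B =====

-- B's letter test (the same comparison chain written in Source B).
def isLetterB (x : String) : Bool :=
  (pyStrLe "а".toList x.toList && pyStrLe x.toList "я".toList) ||
  (pyStrLe "a".toList x.toList && pyStrLe x.toList "z".toList) ||
  (pyStrLe "А".toList x.toList && pyStrLe x.toList "Я".toList) ||
  (pyStrLe "A".toList x.toList && pyStrLe x.toList "Z".toList)

-- One step of Source B's loop body on the state (out_rev, word, seen).
def stepB (st : List String × String × Bool) (x : String) : List String × String × Bool :=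
  if isLetterB x then (st.1, x ++ st.2.1, st.2.2)
  else ((if st.2.2 then st.1 ++ [st.2.1, x] else st.1 ++ [x]), "", true)

def massiv_alt (i : Int) (matrix : List (List String)) (stroka : List String) (dlc_word : String) : List String :=
  match PySem.List.pyGet? matrix i with
  | none => []  -- unreachable under Pre_massiv (Python raises IndexError)
  | some row =>
    -- for x in reversed(row): …
    let st := row.reverse.foldl stepB ([], "", false)
    let out_rev := if st.2.2 then st.1 ++ [dlc_word ++ st.2.1] else st.1
    stroka ++ out_rev.reverse

-- ===== PRECONDITION & SPEC =====
-- Pre_ excludes exactly the inputs where Python A raises IndexError (row index out of range).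
def Pre_massiv (i : Int) (matrix : List (List String)) (stroka : List String) (dlc_word : String) : Prop :=
  PySem.Raise.InRange matrix.length i
instance (i : Int) (matrix : List (List String)) (stroka : List String) (dlc_word : String) : Decidable (Pre_massiv i matrix stroka dlc_word) := by unfold Pre_massiv; infer_instance

def pvWitness_massiv : Int × List (List String) × List String × String :=
  (0, [["a", ",", "bc", " ", "x"]], ["s"], "w")

def Spec_massiv (i : Int) (matrix : List (List String)) (stroka : List String) (dlc_word : String) (out : List String) : Prop := out = massiv_alt i matrix stroka dlc_word
instance (i : Int) (matrix : List (List String)) (stroka : List String) (dlc_word : String) (out : List String) : Decidable (Spec_massiv i matrix stroka dlc_word out) := by unfold Spec_massiv; infer_instance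

-- ===== CLAIM (what is proved, stated in full; the proofs are below) =====
def Claim_equal_massiv : Prop := ∀ (i : Int) (matrix : List (List String)) (stroka : List String) (dlc_word : String), Dom_massiv i matrix stroka dlc_word → Pre_massiv i matrix stroka dlc_word → Spec_massiv i matrix stroka dlc_word (massiv i matrix stroka dlc_word)

-- ===== LEMMAS AND PROOFS =====

-- Reference token list: for each non-letter element, the letters accumulated before it
-- (seeded with d), then the element itself; trailing letters are dropped.
def toks (xs : List String) (d : String) : List String :=
  match xs with
  | [] => []
  | x :: t => if isLetterA x then toks t (d ++ x) else d :: x :: toks t ""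

lemma massivA_foldl (xs : List String) (s : List String) (d : String) :
    (xs.foldl (fun (st : List String × String) x =>
      if isLetterA x then (st.1, st.2 ++ x)
      else (st.1 ++ [st.2, x], "")) (s, d)).1 = s ++ toks xs d := by
  induction xs generalizing s d with
  | nil => simp [toks]
  | cons x t ih =>
    by_cases h : isLetterA x = true
    · simp [toks, h, ih]
    · simp [toks, h, ih]

-- B's right-to-left scan, written as a foldr, produces toks (plus: before the first
-- separator is seen, no token has been emitted).
lemma massivB_foldr (xs : List String) :
    (∀ d : String,
      (if (xs.foldr (fun x st => stepB st x) ([], "", false)).2.2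
         then (xs.foldr (fun x st => stepB st x) ([], "", false)).1
                ++ [d ++ (xs.foldr (fun x st => stepB st x) ([], "", false)).2.1]
         else (xs.foldr (fun x st => stepB st x) ([], "", false)).1).reverse = toks xs d) ∧
    ((xs.foldr (fun x st => stepB st x) ([], "", false)).2.2 = false →
      (xs.foldr (fun x st => stepB st x) ([], "", false)).1 = []) := by
  induction xs with
  | nil => simp [toks]
  | cons x t ih =>
    obtain ⟨ih1, ih2⟩ := ih
    simp only [List.foldr_cons]
    set F := t.foldr (fun x st => stepB st x) ([], "", false) with hF
    have hAB : isLetterA x = isLetterB x := rfl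
    by_cases h : isLetterB x = true
    · constructor
      · intro d
        simp only [stepB, h, if_pos, toks, hAB]
        simpa [String.append_assoc] using ih1 (d ++ x)
      · intro hs
        simp only [stepB, h, if_pos] at hs ⊢
        exact ih2 hs
    · constructor
      · intro d
        simp only [stepB, h, Bool.false_eq_true, if_false, if_true, toks, hAB,
          String.append_empty]
        by_cases hs : F.2.2 = true
        · have := ih1 ""
          simp only [hs, if_true, String.empty_append] at this ⊢
          simp [← this]
        · have hz := ih2 (by simpa using hs)
          have := ih1 ""
          simp only [Bool.not_eq_true] at hs
          simp only [hs, Bool.false_eq_true, if_false] at this ⊢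
          simp [hz, ← this]
      · intro hs
        simp only [stepB, h, Bool.false_eq_true, if_false] at hs
        exact absurd hs (by simp)

-- ===== VERDICT (by name: the statement is the Claim_ definition above) =====
theorem massiv_spec : Claim_equal_massiv := by
  intro i matrix stroka dlc_word _ hpre
  unfold Spec_massiv
  have : ∃ row, PySem.List.pyGet? matrix i = some row := by
    cases hg : PySem.List.pyGet? matrix i with
    | none => exact absurd hpre (by simpa [PySem.List.pyGet?_eq_none_iff] using hg)
    | some row => exact ⟨row, rfl⟩
  obtain ⟨row, hg⟩ := this
  simp only [massiv, massiv_alt, hg]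
  rw [massivA_foldl, List.foldl_reverse]
  have hB := (massivB_foldr row).1 dlc_word
  congr 1
  exact hB.symm
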